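-- pv_equiv track=rewrite | github.com/devbok0101/killing-camp | camp/3week/Lab1.py | solution
-- ===== SOURCE A (Python) =====
-- from collections import deque
-- from copy import deepcopy
--
-- def solution(lab: list[list[int]]) -> int:
--
--     row = len(lab)
--     column = len(lab[0])
--
--     dx = [-1, 1, 0, 0]
--     dy = [0, 0, -1, 1]
--
--     def set_wall(count, answer):
--         if count == 3:
--             return bfs(answer)
--         for cur_row in range(row):
--             for cur_column in range(column):
--                 if lab[cur_row][cur_column] == 0:
--                     lab[cur_row][cur_column] = 1
--                     answer = set_wall(count + 1, answer)
--                     lab[cur_row][cur_column] = 0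
--         return answer
--
--     def bfs(answer):
--         virus_lab = deepcopy(lab)
--         queue = deque()
--         for cur_row in range(row):
--             for cur_column in range(column):
--                 if virus_lab[cur_row][cur_column] == 2:
--                     queue.append((cur_row, cur_column))
--
--         while queue:
--             origin_virus_row, origin_virus_column = queue.popleft()
--             for index in range(4):
--                 next_row = origin_virus_row + dx[index]
--                 next_column = origin_virus_column + dy[index]
--
--                 if 0 <= next_row < row and 0 <= next_column < column and virus_lab[next_row][next_column] == 0:
--                     virus_lab[next_row][next_column] = 2
--                     queue.append((next_row, next_column))
--
--         count = 0
--         for cur_row in range(row):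
--             for cur_column in range(column):
--                 if virus_lab[cur_row][cur_column] == 0:
--                     count += 1
--         return max(answer, count)
--
--     answer = 0
--     return set_wall(0, answer)
-- ===== SOURCE B (Python) =====
-- from collections import deque
--
-- def solution(lab: list[list[int]]) -> int:
--     rows, cols = len(lab), len(lab[0])
--     # one scan: collect empty cells and virus sources up front
--     empties, viruses = [], []
--     for r in range(rows):
--         for c in range(cols):
--             if lab[r][c] == 0:
--                 empties.append((r, c))
--             elif lab[r][c] == 2:
--                 viruses.append((r, c))
--     n = len(empties)
--     best = 0
--     # combinations i<j<k instead of re-scanning the grid per recursion level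
--     for i in range(n):
--         for j in range(i + 1, n):
--             for k in range(j + 1, n):
--                 grid = [row[:] for row in lab]
--                 for (r, c) in (empties[i], empties[j], empties[k]):
--                     grid[r][c] = 1
--                 queue = deque(viruses)
--                 while queue:
--                     r, c = queue.popleft()
--                     for nr, nc in ((r - 1, c), (r + 1, c), (r, c - 1), (r, c + 1)):
--                         if 0 <= nr < rows and 0 <= nc < cols and grid[nr][nc] == 0:
--                             grid[nr][nc] = 2
--                             queue.append((nr, nc))
--                 count = 0
--                 for r in range(rows):
--                     for c in range(cols):
--                         if grid[r][c] == 0: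
--                             count += 1
--                 best = max(best, count)
--     return best
-- ===== Notes on version B (the rewrite author's own statement) =====
-- stated objective: faster
-- what changed: A recursively re-scans the whole grid at each of three wall-placement levels, enumerating all ordered triples (permutations) of empty cells and rescanning for virus sources inside every BFS; B scans the grid once up front to collect the empty-cell and virus-source lists and then iterates index combinations i<j<k over the precomputed empties, flooding from the precomputed sources, so each wall set is evaluated once instead of six times.
import Mathlib
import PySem

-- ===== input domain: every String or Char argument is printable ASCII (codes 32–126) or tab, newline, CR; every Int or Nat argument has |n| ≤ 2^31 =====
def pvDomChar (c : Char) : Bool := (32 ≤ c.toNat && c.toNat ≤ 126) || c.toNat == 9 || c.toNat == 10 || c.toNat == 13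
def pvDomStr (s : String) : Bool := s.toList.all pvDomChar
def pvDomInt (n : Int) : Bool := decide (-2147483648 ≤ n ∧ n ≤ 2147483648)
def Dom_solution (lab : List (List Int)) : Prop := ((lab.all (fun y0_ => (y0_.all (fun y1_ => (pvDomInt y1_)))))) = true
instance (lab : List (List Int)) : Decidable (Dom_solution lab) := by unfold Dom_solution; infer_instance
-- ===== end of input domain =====

-- B replaces A's per-level grid re-scan recursion (all ordered triples of walls, so each wall
-- set is BFS-evaluated six times, with the sources re-scanned each time) by one up-front scan
-- collecting the empty-cell and virus lists and a loop over index combinations i<j<k, so each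
-- wall set is evaluated once (constant-factor speedup mechanism).
-- A mutates `lab` during the recursion but restores it; the equivalence is about the return value.

-- shared grid primitives (both Pythons read/write lab[r][c] the same way)
def gget (g : List (List Int)) (r c : Nat) : Int := (g.getD r []).getD c 0
def gset (g : List (List Int)) (r c : Nat) (v : Int) : List (List Int) :=
  g.set r ((g.getD r []).set c v)
-- row-major traversal of the row×col box ('for r in range(row): for c in range(col)')
def cellList (row col : Nat) : List (Nat × Nat) :=
  (List.range row).flatMap (fun r => (List.range col).map (fun c => (r, c)))
-- the identical BFS while-loop of both Pythons (dx/dy order (-1,0),(1,0),(0,-1),(0,1));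
-- the fuel only makes the recursion total: each step pops one queue element, and at most
-- row*col sources plus row*col conversions are ever enqueued, so 2*row*col+1 never runs out
def bfsLoop (row col : Nat) : Nat → List (List Int) → List (Int × Int) → List (List Int)
  | 0, g, _ => g
  | _, g, [] => g
  | fuel + 1, g, (r, c) :: rest =>
      let st := [((-1 : Int), (0 : Int)), (1, 0), (0, -1), (0, 1)].foldl
        (fun (st : List (List Int) × List (Int × Int)) d =>
          let nr := r + d.1
          let nc := c + d.2
          if 0 ≤ nr ∧ nr < (row : Int) ∧ 0 ≤ nc ∧ nc < (col : Int) ∧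
              gget st.1 nr.toNat nc.toNat == 0 then
            (gset st.1 nr.toNat nc.toNat 2, st.2 ++ [(nr, nc)])
          else st) (g, rest)
      bfsLoop row col fuel st.1 st.2
-- the identical zero-counting double loop of both Pythons
def countZ (row col : Nat) (g : List (List Int)) : Int :=
  (cellList row col).foldl (fun cnt rc => if gget g rc.1 rc.2 == 0 then cnt + 1 else cnt) 0

-- ===== PORT A =====
-- bfs(answer): deepcopy, scan for 2-cells into the queue, spread, count zeros, max with answer
def pvBfsA (row col : Nat) (g : List (List Int)) (ans : Int) : Int :=
  let queue := (cellList row col).foldl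
    (fun q rc => if gget g rc.1 rc.2 == 2 then q ++ [((rc.1 : Int), (rc.2 : Int))] else q) []
  max ans (countZ row col (bfsLoop row col (2 * row * col + 1) g queue))
-- set_wall(count, answer): fuel = 3 - count (A checks count == 3); A sets lab[r][c] = 1,
-- recurses, then restores it, so each level scans the unchanged grid g of that level
def pvSetWall (row col : Nat) : Nat → List (List Int) → Int → Int
  | 0, g, ans => pvBfsA row col g ans
  | fuel + 1, g, ans =>
      (cellList row col).foldl
        (fun a rc => if gget g rc.1 rc.2 == 0 then
            pvSetWall row col fuel (gset g rc.1 rc.2 1) a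
          else a) ans

def solution (lab : List (List Int)) : Int :=
  pvSetWall lab.length lab.headI.length 3 lab 0

-- ===== PORT B =====
-- one scan collecting the empty cells and the virus sources
def pvCollect (row col : Nat) (g : List (List Int)) :
    List (Nat × Nat) × List (Nat × Nat) :=
  (cellList row col).foldl
    (fun ev rc =>
      if gget g rc.1 rc.2 == 0 then (ev.1 ++ [rc], ev.2)
      else if gget g rc.1 rc.2 == 2 then (ev.1, ev.2 ++ [rc]) else ev)
    ([], [])

def solution_alt (lab : List (List Int)) : Int :=
  let row := lab.length
  let col := lab.headI.length
  let ev := pvCollect row col lab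
  let es := ev.1
  let vs := ev.2.map (fun rc => ((rc.1 : Int), (rc.2 : Int)))
  let n := es.length
  (List.range n).foldl (fun best i =>
    (List.range' (i + 1) (n - (i + 1))).foldl (fun best j =>
      (List.range' (j + 1) (n - (j + 1))).foldl (fun best k =>
        let w1 := es.getD i (0, 0)
        let w2 := es.getD j (0, 0)
        let w3 := es.getD k (0, 0)
        let g1 := gset (gset (gset lab w1.1 w1.2 1) w2.1 w2.2 1) w3.1 w3.2 1
        max best (countZ row col (bfsLoop row col (2 * row * col + 1) g1 vs)))
        best)
      best)
    0

-- ===== PRECONDITION & SPEC =====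
-- Pre_ excludes exactly the inputs where A raises IndexError: the empty grid (lab[0]) and
-- grids in which some row is shorter than the first row (lab[r][c] for c < len(lab[0])).
def Pre_solution (lab : List (List Int)) : Prop :=
  lab ≠ [] ∧ ∀ r ∈ lab, lab.headI.length ≤ r.length
instance (lab : List (List Int)) : Decidable (Pre_solution lab) := by
  unfold Pre_solution; infer_instance
def pvWitness_solution : List (List Int) := [[2, 0], [0, 0]]

def Spec_solution (lab : List (List Int)) (out : Int) : Prop := out = solution_alt lab
instance (lab : List (List Int)) (out : Int) : Decidable (Spec_solution lab out) := by
  unfold Spec_solution; infer_instance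

-- ===== CLAIM (what is proved, stated in full; the proofs are below) =====
def Claim_equal_solution : Prop :=
  ∀ (lab : List (List Int)), Dom_solution lab → Pre_solution lab →
    Spec_solution lab (solution lab)

-- ===== LEMMAS AND PROOFS =====

-- proof-side vocabulary
def Wf (row col : Nat) (g : List (List Int)) : Prop :=
  g.length = row ∧ ∀ r ∈ g, col ≤ r.length
def empt (row col : Nat) (g : List (List Int)) : List (Nat × Nat) :=
  (cellList row col).filter (fun rc => gget g rc.1 rc.2 == 0)
def vir (row col : Nat) (g : List (List Int)) : List (Nat × Nat) :=
  (cellList row col).filter (fun rc => gget g rc.1 rc.2 == 2)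
-- A's per-leaf value: flood from the sources of the (walled) grid itself, then count
def valF (row col : Nat) (g : List (List Int)) : Int :=
  countZ row col (bfsLoop row col (2 * row * col + 1) g
    ((vir row col g).map (fun rc => ((rc.1 : Int), (rc.2 : Int)))))
def placeAll (g : List (List Int)) (s : List (Nat × Nat)) : List (List Int) :=
  s.foldl (fun g x => gset g x.1 x.2 1) g
-- the ordered wall sequences A's recursion enumerates
def seqs : Nat → List (Nat × Nat) → List (List (Nat × Nat))
  | 0, _ => [[]]
  | f + 1, l => l.flatMap (fun x => (seqs f (l.erase x)).map (x :: ·))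

lemma mem_cellList (row col : Nat) (rc : Nat × Nat) :
    rc ∈ cellList row col ↔ rc.1 < row ∧ rc.2 < col := by
  cases rc with
  | mk r c => simp [cellList, List.mem_flatMap, List.mem_map, List.mem_range]

lemma nodup_cellList (row col : Nat) : (cellList row col).Nodup := by
  unfold cellList
  refine List.nodup_flatMap.mpr ⟨fun r _ => ?_, ?_⟩
  · exact (List.nodup_range).map (fun a b h => by simpa using h)
  · refine List.Pairwise.imp ?_ (List.pairwise_lt_range)
    intro a b hab x hx hy
    simp only [List.mem_map] at hx hy
    obtain ⟨c1, _, rfl⟩ := hx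
    obtain ⟨c2, _, h⟩ := hy
    exact absurd (congrArg Prod.fst h) (by simp; omega)

lemma gset_wf {row col : Nat} {g : List (List Int)} (h : Wf row col g) (r c : Nat) (v : Int) :
    Wf row col (gset g r c v) := by
  obtain ⟨h1, h2⟩ := h
  by_cases hr : r < g.length
  · refine ⟨by simp [gset, h1], ?_⟩
    intro rw hrw
    rcases List.mem_or_eq_of_mem_set hrw with hm | rfl
    · exact h2 _ hm
    · rw [List.length_set, List.getD_eq_getElem g [] hr]
      exact h2 _ (List.getElem_mem hr)
  · rw [gset, List.set_eq_of_length_le (by omega)]; exact ⟨h1, h2⟩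

lemma getD_set_self_row {g : List (List Int)} {r : Nat} (hr : r < g.length) (x : List Int) :
    (g.set r x).getD r [] = x := by
  rw [List.getD_eq_getElem?_getD, List.getElem?_set_self (by simpa using hr)]; rfl

lemma getD_set_ne_row {g : List (List Int)} {r r' : Nat} (h : r' ≠ r) (x : List Int) :
    (g.set r x).getD r' [] = g.getD r' [] := by
  simp [List.getD_eq_getElem?_getD, List.getElem?_set_ne (fun hh => h hh.symm)]

lemma gget_gset_self {g : List (List Int)} {r c : Nat} (hr : r < g.length)
    (hc : c < (g.getD r []).length) (v : Int) : gget (gset g r c v) r c = v := by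
  unfold gget gset
  rw [getD_set_self_row hr, List.getD_eq_getElem?_getD, List.getElem?_set_self hc]; rfl

lemma gget_gset_ne {g : List (List Int)} {r c r' c' : Nat} (h : (r', c') ≠ (r, c)) (v : Int) :
    gget (gset g r c v) r' c' = gget g r' c' := by
  unfold gget gset
  by_cases hrr : r' = r
  · subst hrr
    have hc : c' ≠ c := by simpa using h
    by_cases hlen : r' < g.length
    · rw [getD_set_self_row hlen]
      simp [List.getD_eq_getElem?_getD, List.getElem?_set_ne (Ne.symm hc)]
    · rw [List.set_eq_of_length_le (by omega)]
  · rw [getD_set_ne_row hrr]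

lemma gset_comm {g : List (List Int)} {r1 c1 r2 c2 : Nat} (h : (r1, c1) ≠ (r2, c2))
    (v w : Int) : gset (gset g r1 c1 v) r2 c2 w = gset (gset g r2 c2 w) r1 c1 v := by
  by_cases hr : r1 = r2
  · subst hr
    have hc : c1 ≠ c2 := by simpa using h
    by_cases hlen : r1 < g.length
    · unfold gset
      rw [getD_set_self_row hlen, getD_set_self_row hlen, List.set_set, List.set_set,
        List.set_comm _ _ hc]
    · have hg : ∀ x, g.set r1 x = g := fun x => List.set_eq_of_length_le (by omega)
      unfold gset
      simp [hg]
  · unfold gset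
    rw [getD_set_ne_row (fun hh => hr hh.symm), getD_set_ne_row hr,
      List.set_comm _ _ hr]

-- flipping the predicate at exactly one member of a nodup list erases exactly it
lemma filter_single_flip {α : Type} [BEq α] [LawfulBEq α] {l : List α} {p p' : α → Bool} {a : α}
    (hn : l.Nodup) (ha : a ∈ l) (hpa : p a = true) (hpa' : p' a = false)
    (hsame : ∀ x ∈ l, x ≠ a → p' x = p x) : l.filter p' = (l.filter p).erase a := by
  induction l with
  | nil => simp at ha
  | cons h t ih =>
    rcases List.mem_cons.mp ha with rfl | hat
    · have hna : a ∉ t := (List.nodup_cons.mp hn).1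
      simp only [List.filter_cons, hpa, hpa', Bool.false_eq_true, if_false, if_true,
        List.erase_cons_head]
      exact List.filter_congr (fun x hx => hsame x (List.mem_cons_of_mem _ hx)
        (fun hxa => hna (hxa ▸ hx)))
    · have hha : h ≠ a := fun hh => (List.nodup_cons.mp hn).1 (hh ▸ hat)
      have hph : p' h = p h := hsame h (List.mem_cons_self ..) hha
      have ihh := ih (List.nodup_cons.mp hn).2 hat
        (fun x hx hxa => hsame x (List.mem_cons_of_mem _ hx) hxa)
      by_cases hcase : p h = true
      · simp only [List.filter_cons, hph, hcase, if_true]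
        rw [List.erase_cons_tail (by simp [hha]), ihh]
      · simp only [List.filter_cons, hph, hcase, Bool.false_eq_true, if_false]
        exact ihh

lemma empt_in_range {row col : Nat} {g : List (List Int)} (hw : Wf row col g)
    {a : Nat × Nat} (ha : a ∈ empt row col g) :
    a.1 < g.length ∧ a.2 < (g.getD a.1 []).length ∧ gget g a.1 a.2 = 0 := by
  obtain ⟨hcell, hp⟩ := List.mem_filter.mp ha
  obtain ⟨h1, h2⟩ := (mem_cellList row col a).mp hcell
  have hr : a.1 < g.length := by rw [hw.1]; exact h1
  have hrow : g.getD a.1 [] = g[a.1] := List.getD_eq_getElem g [] hr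
  have hc : a.2 < (g.getD a.1 []).length := by
    rw [hrow]
    have := hw.2 g[a.1] (List.getElem_mem hr)
    omega
  exact ⟨hr, hc, by simpa using hp⟩

-- walling one empty cell removes exactly it from the empties scan
lemma empt_gset {row col : Nat} {g : List (List Int)} (hw : Wf row col g)
    {a : Nat × Nat} (ha : a ∈ empt row col g) :
    empt row col (gset g a.1 a.2 1) = (empt row col g).erase a := by
  obtain ⟨hr, hc, h0⟩ := empt_in_range hw ha
  obtain ⟨hcell, hp⟩ := List.mem_filter.mp ha
  refine filter_single_flip (p := fun rc => gget g rc.1 rc.2 == 0)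
    (p' := fun rc => gget (gset g a.1 a.2 1) rc.1 rc.2 == 0)
    (nodup_cellList row col) hcell hp ?_ ?_
  · simp [gget_gset_self hr hc]
  · intro x hx hxa
    simp [gget_gset_ne (v := 1) hxa]

-- walling an empty cell leaves the virus-source scan unchanged
lemma vir_gset {row col : Nat} {g : List (List Int)} (hw : Wf row col g)
    {a : Nat × Nat} (ha : a ∈ empt row col g) :
    vir row col (gset g a.1 a.2 1) = vir row col g := by
  obtain ⟨hr, hc, h0⟩ := empt_in_range hw ha
  apply List.filter_congr
  intro x hx
  by_cases hxa : x = a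
  · subst hxa
    simp [gget_gset_self hr hc, h0]
  · simp [gget_gset_ne (v := 1) hxa]

-- fold/max toolbox
lemma foldl_max_le {l : List Int} {a c : Int} (h1 : a ≤ c) (h2 : ∀ x ∈ l, x ≤ c) :
    l.foldl max a ≤ c := by
  induction l generalizing a with
  | nil => exact h1
  | cons x t ih =>
    exact ih (max_le h1 (h2 x (by simp))) (fun y hy => h2 y (by simp [hy]))

lemma fm_foldl {α : Type} (F : α → List Int) (l : List α) (a : Int) :
    l.foldl (fun acc x => (F x).foldl max acc) a = (l.flatMap F).foldl max a := by
  induction l generalizing a with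
  | nil => rfl
  | cons x t ih => simp [List.flatMap_cons, List.foldl_append, ih]

-- A's recursion = running max of A's leaf value over all ordered wall sequences
lemma setWall_char (row col : Nat) (f : Nat) :
    ∀ g, Wf row col g → ∀ ans,
      pvSetWall row col f g ans =
        ((seqs f (empt row col g)).map (fun s => valF row col (placeAll g s))).foldl max ans := by
  induction f with
  | zero =>
    intro g _ ans
    show pvBfsA row col g ans = _
    unfold pvBfsA
    rw [PySem.List.foldl_append_if]
    simp only [seqs, List.map_cons, List.map_nil, List.foldl_cons, List.foldl_nil]
    rfl
  | succ f ih =>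
    intro g hw ans
    show (cellList row col).foldl
        (fun a rc => if gget g rc.1 rc.2 == 0 then
          pvSetWall row col f (gset g rc.1 rc.2 1) a else a) ans = _
    rw [← List.foldl_filter]
    have step2 : (empt row col g).foldl
        (fun a rc => pvSetWall row col f (gset g rc.1 rc.2 1) a) ans =
        (empt row col g).foldl
          (fun a x => (((seqs f ((empt row col g).erase x)).map
            (fun s => valF row col (placeAll g (x :: s)))).foldl max a)) ans := by
      apply PySem.List.foldl_congr_mem
      intro acc x hx
      rw [ih _ (gset_wf hw x.1 x.2 1) acc, empt_gset hw hx]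
      simp only [placeAll, List.foldl_cons]
    unfold empt at step2 ⊢
    rw [step2, fm_foldl]
    congr 1
    simp only [seqs, List.map_flatMap, List.map_map]
    rfl

def place3 (g : List (List Int)) (x y z : Nat × Nat) : List (List Int) :=
  gset (gset (gset g x.1 x.2 1) y.1 y.2 1) z.1 z.2 1

def bval (row col : Nat) (lab : List (List Int)) (E : List (Nat × Nat)) (i j k : Nat) : Int :=
  countZ row col (bfsLoop row col (2 * row * col + 1)
    (place3 lab (E.getD i (0, 0)) (E.getD j (0, 0)) (E.getD k (0, 0)))
    ((vir row col lab).map (fun rc => ((rc.1 : Int), (rc.2 : Int)))))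

def blist (row col : Nat) (lab : List (List Int)) (E : List (Nat × Nat)) (n : Nat) : List Int :=
  (List.range n).flatMap (fun i =>
    (List.range' (i + 1) (n - (i + 1))).flatMap (fun j =>
      (List.range' (j + 1) (n - (j + 1))).map (fun k => bval row col lab E i j k)))

lemma collect_aux (l : List (Nat × Nat)) (p q : Nat × Nat → Bool) :
    ∀ e v : List (Nat × Nat),
      l.foldl (fun ev rc => if p rc then (ev.1 ++ [rc], ev.2)
        else if q rc then (ev.1, ev.2 ++ [rc]) else ev) (e, v)
      = (e ++ l.filter p, v ++ l.filter (fun rc => !p rc && q rc)) := by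
  induction l with
  | nil => simp
  | cons h t ih =>
    intro e v
    by_cases hp : p h = true
    · simp [hp, ih]
    · by_cases hq : q h = true
      · simp [hp, hq, ih]
      · simp [hp, hq, ih]

lemma collect_eq (row col : Nat) (g : List (List Int)) :
    pvCollect row col g = (empt row col g, vir row col g) := by
  unfold pvCollect
  rw [collect_aux]
  simp only [List.nil_append]
  refine Prod.ext rfl ?_
  show List.filter _ _ = vir row col g
  apply List.filter_congr
  intro x _
  by_cases h : gget g x.1 x.2 = 2
  · simp [h]
  · simp [h]

lemma alt_char (lab : List (List Int)) :
    solution_alt lab =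
      (blist lab.length lab.headI.length lab (empt lab.length lab.headI.length lab)
        (empt lab.length lab.headI.length lab).length).foldl max 0 := by
  simp only [solution_alt, collect_eq]
  set row := lab.length
  set col := lab.headI.length
  set E := empt row col lab with hE
  set n := E.length
  set vs := (vir row col lab).map (fun rc => ((rc.1 : Int), (rc.2 : Int))) with hvs
  have hinner : ∀ (i : Nat) (best : Int),
      (List.range' (i + 1) (n - (i + 1))).foldl (fun best j =>
        (List.range' (j + 1) (n - (j + 1))).foldl (fun best k =>
          max best (countZ row col (bfsLoop row col (2 * row * col + 1)
            (gset (gset (gset lab (E.getD i (0, 0)).1 (E.getD i (0, 0)).2 1)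
              (E.getD j (0, 0)).1 (E.getD j (0, 0)).2 1)
              (E.getD k (0, 0)).1 (E.getD k (0, 0)).2 1) vs))) best) best =
      ((List.range' (i + 1) (n - (i + 1))).flatMap (fun j =>
        (List.range' (j + 1) (n - (j + 1))).map (fun k => bval row col lab E i j k))).foldl
        max best := by
    intro i best
    rw [← fm_foldl]
    apply PySem.List.foldl_congr_mem
    intro acc j _
    rw [← List.foldl_map]
    rfl
  have houter : (fun (best : Int) (i : Nat) =>
      (List.range' (i + 1) (n - (i + 1))).foldl (fun best j =>
        (List.range' (j + 1) (n - (j + 1))).foldl (fun best k =>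
          max best (countZ row col (bfsLoop row col (2 * row * col + 1)
            (gset (gset (gset lab (E.getD i (0, 0)).1 (E.getD i (0, 0)).2 1)
              (E.getD j (0, 0)).1 (E.getD j (0, 0)).2 1)
              (E.getD k (0, 0)).1 (E.getD k (0, 0)).2 1) vs))) best) best) =
      (fun (best : Int) (i : Nat) =>
        ((List.range' (i + 1) (n - (i + 1))).flatMap (fun j =>
          (List.range' (j + 1) (n - (j + 1))).map (fun k => bval row col lab E i j k))).foldl
          max best) := by
    funext best i
    exact hinner i best
  rw [houter, fm_foldl]
  rfl

lemma mem_blist {row col n : Nat} {lab : List (List Int)} {E : List (Nat × Nat)} {y : Int} :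
    y ∈ blist row col lab E n ↔
      ∃ i j k, i < j ∧ j < k ∧ k < n ∧ y = bval row col lab E i j k := by
  simp only [blist, List.mem_flatMap, List.mem_map, List.mem_range, List.mem_range'_1]
  constructor
  · rintro ⟨i, hi, j, hj, k, hk, rfl⟩
    exact ⟨i, j, k, by omega, by omega, by omega, rfl⟩
  · rintro ⟨i, j, k, h1, h2, h3, rfl⟩
    exact ⟨i, by omega, j, ⟨by omega, by omega⟩, k, ⟨by omega, by omega⟩, rfl⟩

lemma mem_seqs3 {l : List (Nat × Nat)} {s : List (Nat × Nat)} :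
    s ∈ seqs 3 l ↔ ∃ x ∈ l, ∃ y ∈ l.erase x, ∃ z ∈ (l.erase x).erase y, s = [x, y, z] := by
  have h3 : seqs 3 l = l.flatMap (fun x => (seqs 2 (l.erase x)).map (x :: ·)) := rfl
  have h2 : ∀ m : List (Nat × Nat),
      seqs 2 m = m.flatMap (fun y => (seqs 1 (m.erase y)).map (y :: ·)) := fun _ => rfl
  have h1 : ∀ m : List (Nat × Nat),
      seqs 1 m = m.flatMap (fun z => (seqs 0 (m.erase z)).map (z :: ·)) := fun _ => rfl
  have h0 : ∀ m : List (Nat × Nat), seqs 0 m = [[]] := fun _ => rfl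
  rw [h3]
  simp only [List.mem_flatMap, List.mem_map]
  constructor
  · rintro ⟨x, hx, s2, hs2, rfl⟩
    rw [h2] at hs2
    simp only [List.mem_flatMap, List.mem_map] at hs2
    obtain ⟨y, hy, s1, hs1, rfl⟩ := hs2
    rw [h1] at hs1
    simp only [List.mem_flatMap, List.mem_map] at hs1
    obtain ⟨z, hz, s0, hs0, rfl⟩ := hs1
    rw [h0] at hs0
    simp only [List.mem_singleton] at hs0
    subst hs0
    exact ⟨x, hx, y, hy, z, hz, rfl⟩
  · rintro ⟨x, hx, y, hy, z, hz, rfl⟩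
    refine ⟨x, hx, [y, z], ?_, rfl⟩
    rw [h2]
    simp only [List.mem_flatMap, List.mem_map]
    refine ⟨y, hy, [z], ?_, rfl⟩
    rw [h1]
    simp only [List.mem_flatMap, List.mem_map]
    exact ⟨z, hz, [], by rw [h0]; simp, rfl⟩

lemma placeAll_three (g : List (List Int)) (x y z : Nat × Nat) :
    placeAll g [x, y, z] = place3 g x y z := rfl

lemma place3_swap12 {x y : Nat × Nat} (g : List (List Int)) (h : x ≠ y) (z : Nat × Nat) :
    place3 g x y z = place3 g y x z := by
  unfold place3
  exact congrArg (fun t => gset t z.1 z.2 1) (gset_comm (by simpa using h) 1 1)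

lemma place3_swap23 {y z : Nat × Nat} (g : List (List Int)) (x : Nat × Nat) (h : y ≠ z) :
    place3 g x y z = place3 g x z y := by
  unfold place3
  rw [gset_comm (by simpa using h)]

-- A's leaf scans the walled grid for sources; walls sit on formerly-empty cells, so the
-- source scan of the walled grid is the source scan of the original grid
lemma valF_place3 {row col : Nat} {lab : List (List Int)} (hw : Wf row col lab)
    {x y z : Nat × Nat} (hx : x ∈ empt row col lab) (hy : y ∈ empt row col lab)
    (hz : z ∈ empt row col lab) (hyx : y ≠ x) (hzx : z ≠ x) (hzy : z ≠ y) :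
    valF row col (place3 lab x y z) =
      countZ row col (bfsLoop row col (2 * row * col + 1) (place3 lab x y z)
        ((vir row col lab).map (fun rc => ((rc.1 : Int), (rc.2 : Int))))) := by
  have hw1 : Wf row col (gset lab x.1 x.2 1) := gset_wf hw x.1 x.2 1
  have he1 : empt row col (gset lab x.1 x.2 1) = (empt row col lab).erase x := empt_gset hw hx
  have hy1 : y ∈ empt row col (gset lab x.1 x.2 1) := by
    rw [he1]; exact (List.mem_erase_of_ne hyx).mpr hy
  have hz1 : z ∈ empt row col (gset lab x.1 x.2 1) := by
    rw [he1]; exact (List.mem_erase_of_ne hzx).mpr hz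
  have hw2 : Wf row col (gset (gset lab x.1 x.2 1) y.1 y.2 1) := gset_wf hw1 y.1 y.2 1
  have hz2 : z ∈ empt row col (gset (gset lab x.1 x.2 1) y.1 y.2 1) := by
    rw [empt_gset hw1 hy1]; exact (List.mem_erase_of_ne hzy).mpr hz1
  have hv : vir row col (place3 lab x y z) = vir row col lab := by
    unfold place3
    rw [vir_gset hw2 hz2, vir_gset hw1 hy1, vir_gset hw hx]
  unfold valF
  rw [hv]

lemma bval_eq_valF {row col : Nat} {lab : List (List Int)} (hw : Wf row col lab)
    {i j k : Nat} (hi : i < (empt row col lab).length) (hj : j < (empt row col lab).length)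
    (hk : k < (empt row col lab).length) (hij : i ≠ j) (hik : i ≠ k) (hjk : j ≠ k) :
    bval row col lab (empt row col lab) i j k =
      valF row col (place3 lab ((empt row col lab).getD i (0, 0))
        ((empt row col lab).getD j (0, 0)) ((empt row col lab).getD k (0, 0))) := by
  have hnd : (empt row col lab).Nodup := (nodup_cellList row col).filter _
  have hgi : (empt row col lab).getD i (0, 0) = (empt row col lab)[i] :=
    List.getD_eq_getElem _ _ hi
  have hgj : (empt row col lab).getD j (0, 0) = (empt row col lab)[j] :=
    List.getD_eq_getElem _ _ hj
  have hgk : (empt row col lab).getD k (0, 0) = (empt row col lab)[k] :=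
    List.getD_eq_getElem _ _ hk
  have hmi : (empt row col lab).getD i (0, 0) ∈ empt row col lab := by
    rw [hgi]; exact List.getElem_mem hi
  have hmj : (empt row col lab).getD j (0, 0) ∈ empt row col lab := by
    rw [hgj]; exact List.getElem_mem hj
  have hmk : (empt row col lab).getD k (0, 0) ∈ empt row col lab := by
    rw [hgk]; exact List.getElem_mem hk
  have hne : ∀ {a b : Nat}, ∀ ha : a < (empt row col lab).length,
      ∀ hb : b < (empt row col lab).length, a ≠ b →
      (empt row col lab).getD a (0, 0) ≠ (empt row col lab).getD b (0, 0) := by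
    intro a b ha hb hab
    rw [List.getD_eq_getElem _ _ ha, List.getD_eq_getElem _ _ hb]
    intro hcontra
    exact hab ((List.Nodup.getElem_inj_iff hnd).mp hcontra)
  rw [bval, valF_place3 hw hmi hmj hmk (hne hj hi (Ne.symm hij)) (hne hk hi (Ne.symm hik))
    (hne hk hj (Ne.symm hjk))]

-- ===== VERDICT (by name: the statement is the Claim_ definition above) =====
theorem solution_spec : Claim_equal_solution := by
  intro lab _ hpre
  unfold Spec_solution
  obtain ⟨hne, hlen⟩ := hpre
  have hw : Wf lab.length lab.headI.length lab := ⟨rfl, hlen⟩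
  rw [alt_char, show solution lab = pvSetWall lab.length lab.headI.length 3 lab 0 from rfl,
    setWall_char lab.length lab.headI.length 3 lab hw 0]
  set row := lab.length
  set col := lab.headI.length
  set E := empt row col lab with hE
  set n := E.length with hn
  have hnd : E.Nodup := (nodup_cellList row col).filter _
  have sorted_le : ∀ a b c : Nat, a < b → b < c → c < n →
      valF row col (place3 lab (E.getD a (0, 0)) (E.getD b (0, 0)) (E.getD c (0, 0))) ≤
        (blist row col lab E n).foldl max 0 := by
    intro a b c hab hbc hcn
    have := bval_eq_valF (lab := lab) hw (i := a) (j := b) (k := c)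
      (by rw [← hE]; omega) (by rw [← hE]; omega) (by rw [← hE]; omega)
      (by omega) (by omega) (by omega)
    rw [← hE] at this
    rw [← this]
    exact (PySem.List.le_foldl_max _ _).2 _
      (mem_blist.mpr ⟨a, b, c, hab, hbc, hcn, rfl⟩)
  apply le_antisymm
  · -- every ordered wall sequence of A appears (reordered) as an index combination of B
    apply foldl_max_le ((PySem.List.le_foldl_max _ _).1)
    intro v hv
    obtain ⟨s, hs, rfl⟩ := List.mem_map.mp hv
    obtain ⟨x, hx, y, hy', z, hz', rfl⟩ := mem_seqs3.mp hs
    obtain ⟨hyx, hy⟩ := (List.Nodup.mem_erase_iff hnd).mp hy'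
    obtain ⟨hzy, hz''⟩ := (List.Nodup.mem_erase_iff (hnd.erase x)).mp hz'
    obtain ⟨hzx, hz⟩ := (List.Nodup.mem_erase_iff hnd).mp hz''
    obtain ⟨a, han, hEa⟩ := List.mem_iff_getElem.mp hx
    obtain ⟨b, hbn, hEb⟩ := List.mem_iff_getElem.mp hy
    obtain ⟨c, hcn, hEc⟩ := List.mem_iff_getElem.mp hz
    have hga : E.getD a (0, 0) = x := by rw [List.getD_eq_getElem _ _ han, hEa]
    have hgb : E.getD b (0, 0) = y := by rw [List.getD_eq_getElem _ _ hbn, hEb]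
    have hgc : E.getD c (0, 0) = z := by rw [List.getD_eq_getElem _ _ hcn, hEc]
    have hab : a ≠ b := by intro h; subst h; exact hyx (hEb.symm.trans hEa)
    have hac : a ≠ c := by intro h; subst h; exact hzx (hEc.symm.trans hEa)
    have hbc : b ≠ c := by intro h; subst h; exact hzy (hEc.symm.trans hEb)
    rw [placeAll_three]
    have hxy : x ≠ y := fun h => hyx h.symm
    have hxz : x ≠ z := fun h => hzx h.symm
    have hyz : y ≠ z := fun h => hzy h.symm
    rcases Nat.lt_trichotomy a b with h1 | h1 | h1
    · rcases Nat.lt_trichotomy b c with h2 | h2 | h2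
      · -- a < b < c
        have := sorted_le a b c h1 h2 (by omega)
        rwa [hga, hgb, hgc] at this
      · omega
      · rcases Nat.lt_trichotomy a c with h3 | h3 | h3
        · -- a < c < b
          rw [place3_swap23 lab x hyz]
          have := sorted_le a c b h3 h2 (by omega)
          rwa [hga, hgb, hgc] at this
        · omega
        · -- c < a < b
          rw [place3_swap23 lab x hyz, place3_swap12 lab hxz]
          have := sorted_le c a b h3 h1 (by omega)
          rwa [hga, hgb, hgc] at this
    · omega
    · rcases Nat.lt_trichotomy a c with h2 | h2 | h2
      · -- b < a < c
        rw [place3_swap12 lab hxy]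
        have := sorted_le b a c h1 h2 (by omega)
        rwa [hga, hgb, hgc] at this
      · omega
      · rcases Nat.lt_trichotomy b c with h3 | h3 | h3
        · -- b < c < a
          rw [place3_swap12 lab hxy, place3_swap23 lab y hxz]
          have := sorted_le b c a h3 h2 (by omega)
          rwa [hga, hgb, hgc] at this
        · omega
        · -- c < b < a
          rw [place3_swap12 lab hxy, place3_swap23 lab y hxz, place3_swap12 lab hyz]
          have := sorted_le c b a h3 h1 (by omega)
          rwa [hga, hgb, hgc] at this
  · -- every index combination of B is one of A's ordered wall sequences
    apply foldl_max_le ((PySem.List.le_foldl_max _ _).1)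
    intro v hv
    obtain ⟨i, j, k, hij, hjk, hkn, rfl⟩ := mem_blist.mp hv
    have hi : i < n := by omega
    have hj : j < n := by omega
    have heq := bval_eq_valF (lab := lab) hw (i := i) (j := j) (k := k)
      (by rw [← hE]; omega) (by rw [← hE]; omega) (by rw [← hE]; omega)
      (by omega) (by omega) (by omega)
    rw [← hE] at heq
    rw [heq]
    apply (PySem.List.le_foldl_max _ _).2
    apply List.mem_map.mpr
    refine ⟨[E.getD i (0, 0), E.getD j (0, 0), E.getD k (0, 0)], ?_, by rw [placeAll_three]⟩
    have hgi : E.getD i (0, 0) = E[i] := List.getD_eq_getElem _ _ hi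
    have hgj : E.getD j (0, 0) = E[j] := List.getD_eq_getElem _ _ hj
    have hgk : E.getD k (0, 0) = E[k] := List.getD_eq_getElem _ _ hkn
    have hmi : E.getD i (0, 0) ∈ E := by rw [hgi]; exact List.getElem_mem hi
    have hmj : E.getD j (0, 0) ∈ E := by rw [hgj]; exact List.getElem_mem hj
    have hmk : E.getD k (0, 0) ∈ E := by rw [hgk]; exact List.getElem_mem hkn
    have hji : E.getD j (0, 0) ≠ E.getD i (0, 0) := by
      rw [hgi, hgj]
      exact fun h => absurd ((List.Nodup.getElem_inj_iff hnd).mp h) (by omega)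
    have hki : E.getD k (0, 0) ≠ E.getD i (0, 0) := by
      rw [hgi, hgk]
      exact fun h => absurd ((List.Nodup.getElem_inj_iff hnd).mp h) (by omega)
    have hkj : E.getD k (0, 0) ≠ E.getD j (0, 0) := by
      rw [hgj, hgk]
      exact fun h => absurd ((List.Nodup.getElem_inj_iff hnd).mp h) (by omega)
    exact mem_seqs3.mpr ⟨_, hmi, _, (List.mem_erase_of_ne hji).mpr hmj, _,
      (List.mem_erase_of_ne hkj).mpr ((List.mem_erase_of_ne hki).mpr hmk), rfl⟩
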